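-- pv_equiv track=rewrite | github.com/CzarX86/CoupaDownloads | embeddinggemma_feasibility/entity_parsing.py | _keywords_from_hint
-- ===== SOURCE A (Python) =====
-- from typing import Dict, Iterable, List, Optional, Sequence
--
-- def _keywords_from_hint(hint: str) -> List[str]:
--     """Extract meaningful keywords from a hint/pattern string."""
--
--     tokens: List[str] = []
--     current: List[str] = []
--     for ch in hint:
--         if ch.isalnum():
--             current.append(ch)
--         else:
--             if current:
--                 token = "".join(current)
--                 if len(token) > 2 or token.upper() in {"PO", "PWO", "FX"}:
--                     tokens.append(token.lower())
--                 current = []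
--     if current:
--         token = "".join(current)
--         if len(token) > 2 or token.upper() in {"PO", "PWO", "FX"}:
--             tokens.append(token.lower())
--     return tokens
-- ===== SOURCE B (Python) =====
-- from typing import List
--
--
-- def _keywords_from_hint(hint: str) -> List[str]:
--     """Extract meaningful keywords from a hint/pattern string."""
--     words = "".join(ch if ch.isalnum() else " " for ch in hint).split()
--     return [w.lower() for w in words if len(w) > 2 or w.upper() in {"PO", "PWO", "FX"}]
-- ===== Notes on version B (the rewrite author's own statement) =====
-- stated objective: idiomatic
-- what changed: Replaced the explicit accumulator-and-flush state machine (with its duplicated tail-flush block) by a two-phase pipeline: map non-alphanumeric characters to spaces, str.split() into words, then one filter+map comprehension.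
import Mathlib
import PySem

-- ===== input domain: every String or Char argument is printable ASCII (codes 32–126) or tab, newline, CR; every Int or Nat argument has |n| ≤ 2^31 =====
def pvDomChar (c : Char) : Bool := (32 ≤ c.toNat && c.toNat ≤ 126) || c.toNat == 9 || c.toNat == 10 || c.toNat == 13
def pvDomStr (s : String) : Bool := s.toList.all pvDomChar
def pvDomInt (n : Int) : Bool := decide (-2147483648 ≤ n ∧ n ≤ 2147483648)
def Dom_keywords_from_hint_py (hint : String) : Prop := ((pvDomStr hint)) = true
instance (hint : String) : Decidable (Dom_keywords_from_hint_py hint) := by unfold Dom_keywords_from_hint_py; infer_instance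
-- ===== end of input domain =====

-- B replaces A's accumulator-and-flush state machine by map-to-space + split() + one filter/map comprehension (idiomatic; same cost).

-- ===== PORT A =====
-- the filter both versions share: len(token) > 2 or token.upper() in {"PO","PWO","FX"}
def kwKeep (token : String) : Bool :=
  decide (2 < PySem.Str.len token) || decide (PySem.Str.upper token ∈ (["PO", "PWO", "FX"] : List String))

-- one iteration of A's for-loop over the state (tokens, current)
def kwStep (st : List String × List Char) (ch : Char) : List String × List Char :=
  if PySem.Chars.isalnum ch then (st.1, st.2 ++ [ch])
  else if st.2.isEmpty then (st.1, st.2)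
  else
    let token := String.ofList st.2
    ((if kwKeep token then st.1 ++ [PySem.Str.lower token] else st.1), [])

def keywords_from_hint_py (hint : String) : List String :=
  let st := hint.toList.foldl kwStep ([], [])
  if st.2.isEmpty then st.1
  else
    let token := String.ofList st.2
    if kwKeep token then st.1 ++ [PySem.Str.lower token] else st.1

-- ===== PORT B =====
def keywords_from_hint_py_alt (hint : String) : List String :=
  let words := PySem.Str.split₀
    (String.ofList (hint.toList.map (fun ch => if PySem.Chars.isalnum ch then ch else ' ')))
  (words.filter kwKeep).map PySem.Str.lower

-- ===== PRECONDITION & SPEC =====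
def Spec_keywords_from_hint_py (hint : String) (out : List String) : Prop := out = keywords_from_hint_py_alt hint
instance (hint : String) (out : List String) : Decidable (Spec_keywords_from_hint_py hint out) := by unfold Spec_keywords_from_hint_py; infer_instance

-- ===== CLAIM (what is proved, stated in full; the proofs are below) =====
def Claim_equal_keywords_from_hint_py : Prop := ∀ (hint : String), Dom_keywords_from_hint_py hint → Spec_keywords_from_hint_py hint (keywords_from_hint_py hint)

-- ===== LEMMAS AND PROOFS =====

-- an alphanumeric character is not Python whitespace
lemma isalnum_not_isspace (c : Char) (h : PySem.Chars.isalnum c = true) :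
    PySem.Chars.isspace c = false := by
  simp only [PySem.Chars.isalnum, PySem.Chars.isalpha, PySem.Chars.isdigit, PySem.Chars.isspace,
    PySem.Chars.isupper, PySem.Chars.islower, Bool.or_eq_true, Bool.and_eq_true, decide_eq_true_eq,
    Bool.or_eq_false_iff, Bool.and_eq_false_iff, decide_eq_false_iff_not,
    Char.le_def, UInt32.le_iff_toNat_le] at h ⊢
  simp only [Char.toNat] at *
  have h1 : ('A' : Char).val.toNat = 65 := rfl
  have h2 : ('Z' : Char).val.toNat = 90 := rfl
  have h3 : ('a' : Char).val.toNat = 97 := rfl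
  have h4 : ('z' : Char).val.toNat = 122 := rfl
  have h5 : ('0' : Char).val.toNat = 48 := rfl
  have h6 : ('9' : Char).val.toNat = 57 := rfl
  omega

-- split₀.go with a nonempty accumulator just prepends its reversal
lemma split₀_go_acc (xs : List Char) : ∀ (cur : List Char) (acc : List (List Char)),
    PySem.Chars.split₀.go xs cur acc = acc.reverse ++ PySem.Chars.split₀.go xs cur [] := by
  induction xs with
  | nil =>
    intro cur acc
    simp only [PySem.Chars.split₀.go]
    by_cases h : cur.isEmpty <;> simp [h]
  | cons c rest ih =>
    intro cur acc
    simp only [PySem.Chars.split₀.go]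
    by_cases hs : PySem.Chars.isspace c <;> by_cases h : cur.isEmpty <;>
      simp only [hs, h, if_true, if_false, Bool.false_eq_true]
    · exact ih [] acc
    · rw [ih [] (cur.reverse :: acc), ih [] [cur.reverse]]; simp
    · exact ih _ _
    · exact ih _ _

-- A's tail flush, as a function of the loop state
def kwFin (st : List String × List Char) : List String :=
  if st.2.isEmpty then st.1
  else if kwKeep (String.ofList st.2) then st.1 ++ [PySem.Str.lower (String.ofList st.2)] else st.1

-- invariant: A's loop from state (tokens, cur) computes tokens ++ B's pipeline on the rest,
-- with cur as the open word in split₀.go's accumulator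
lemma main_invariant (cs : List Char) : ∀ (tokens : List String) (cur : List Char),
    kwFin (cs.foldl kwStep (tokens, cur))
      = tokens ++ (((PySem.Chars.split₀.go (cs.map (fun ch => if PySem.Chars.isalnum ch then ch else ' ')) cur.reverse []).map String.ofList).filter kwKeep).map PySem.Str.lower := by
  induction cs with
  | nil =>
    intro tokens cur
    simp only [List.foldl_nil, List.map_nil, PySem.Chars.split₀.go, List.isEmpty_reverse,
      List.reverse_reverse]
    unfold kwFin
    by_cases h : cur.isEmpty <;> simp only [h, if_true, if_false, Bool.false_eq_true]
    · simp
    · by_cases hk : kwKeep (String.ofList cur) <;> simp [hk]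
  | cons c rest ih =>
    intro tokens cur
    simp only [List.foldl_cons, List.map_cons, PySem.Chars.split₀.go]
    by_cases ha : PySem.Chars.isalnum c
    · have hs : PySem.Chars.isspace c = false := isalnum_not_isspace c ha
      simp only [ha, if_true, hs, Bool.false_eq_true, if_false, kwStep]
      have : c :: cur.reverse = (cur ++ [c]).reverse := by simp
      rw [this]
      exact ih tokens (cur ++ [c])
    · have hs : PySem.Chars.isspace ' ' = true := by decide
      simp only [ha, Bool.false_eq_true, if_false, hs, if_true, kwStep, List.isEmpty_reverse]
      by_cases h : cur.isEmpty
      · simp only [h, if_true]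
        have hc : cur = [] := List.isEmpty_iff.mp h
        subst hc
        exact ih tokens []
      · simp only [h, Bool.false_eq_true, if_false]
        rw [split₀_go_acc _ [] [cur.reverse.reverse]]
        simp only [List.reverse_cons, List.reverse_nil, List.nil_append, List.map_append,
          List.map_cons, List.map_nil, List.filter_append, List.reverse_reverse]
        rw [ih _ []]
        by_cases hk : kwKeep (String.ofList cur) <;> simp [hk]

-- ===== VERDICT (by name: the statement is the Claim_ definition above) =====
theorem keywords_from_hint_py_spec : Claim_equal_keywords_from_hint_py := by
  intro hint _
  unfold Spec_keywords_from_hint_py keywords_from_hint_py keywords_from_hint_py_alt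
  have h := main_invariant hint.toList [] []
  unfold kwFin at h
  simp only [List.reverse_nil] at h
  rw [h]
  simp [PySem.Str.split₀, PySem.Chars.split₀, String.toList_ofList]
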